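-- pv_equiv track=rewrite | github.com/dekuNukem/duckyPad-Pro | pc_software/make_bytecode.py | get_partial_varname_addr
-- ===== SOURCE A (Python) =====
-- def get_partial_varname_addr(msg, vad):
--     if len(msg) == 0:
--         return None, None
--     last_match = None
--     for x in range(len(msg)+1):
--         partial_name = msg[:x]
--         if partial_name in vad:
--             last_match = partial_name
--     if last_match is not None:
--         return last_match, vad[last_match]
--     return None, None
-- ===== SOURCE B (Python) =====
-- def get_partial_varname_addr(msg, vad):
--     if len(msg) == 0:
--         return None, None
--     best = None
--     for k, v in vad.items():
--         if msg.startswith(k) and (best is None or len(k) > len(best[0])):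
--             best = (k, v)
--     if best is None:
--         return None, None
--     return best
-- ===== Notes on version B (the rewrite author's own statement) =====
-- stated objective: faster
-- what changed: Instead of building every prefix msg[:x] and testing dict membership at each message position (quadratic character work in len(msg)), B iterates once over the dict items and keeps the first entry whose key is a prefix of msg of maximal length, so no prefix strings are built and no final lookup pass is needed.
import Mathlib
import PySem

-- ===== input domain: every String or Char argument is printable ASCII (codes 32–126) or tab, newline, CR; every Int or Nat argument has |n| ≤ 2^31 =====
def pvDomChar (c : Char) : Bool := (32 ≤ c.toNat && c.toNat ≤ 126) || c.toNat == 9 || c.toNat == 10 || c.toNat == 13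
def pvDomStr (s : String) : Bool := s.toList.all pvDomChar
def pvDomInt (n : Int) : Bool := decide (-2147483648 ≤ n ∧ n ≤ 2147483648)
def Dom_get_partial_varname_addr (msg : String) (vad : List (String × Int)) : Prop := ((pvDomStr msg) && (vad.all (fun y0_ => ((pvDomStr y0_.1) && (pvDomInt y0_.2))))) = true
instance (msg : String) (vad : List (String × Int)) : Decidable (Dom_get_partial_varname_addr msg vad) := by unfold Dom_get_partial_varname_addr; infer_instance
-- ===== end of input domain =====

-- B replaces A's scan over every message position (building msg[:x] and testing dict membership each time)
-- by a single pass over the dict items that keeps the first longest key that is a prefix of msg.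

-- ===== PORT A =====
def get_partial_varname_addr (msg : String) (vad : List (String × Int)) : Option String × Option Int :=
  if PySem.Str.len msg = 0 then (none, none)
  else
    let last_match := (PySem.List.pyRange 0 (PySem.Str.len msg + 1) 1).foldl
      (fun lm x =>
        let partial_name := PySem.Str.slice msg none (some x)
        if vad.any (fun kv => kv.1 == partial_name) then some partial_name else lm)
      (none : Option String)
    match last_match with
    | some k => (some k, (vad.find? (fun kv => kv.1 == k)).map (·.2))
    | none => (none, none)

-- ===== PORT B =====
-- B-side helper: the loop body ('if msg.startswith(k) and (best is None or len(k) > len(best[0])): best = (k, v)')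
def pvStepB (msg : String) (best : Option (String × Int)) (kv : String × Int) : Option (String × Int) :=
  if PySem.Str.startswith msg kv.1 &&
      (match best with
       | none => true
       | some b => decide (PySem.Str.len b.1 < PySem.Str.len kv.1)) then some kv else best

def get_partial_varname_addr_alt (msg : String) (vad : List (String × Int)) : Option String × Option Int :=
  if PySem.Str.len msg = 0 then (none, none)
  else
    match vad.foldl (pvStepB msg) none with
    | some (k, v) => (some k, some v)
    | none => (none, none)

-- ===== PRECONDITION & SPEC =====
def Spec_get_partial_varname_addr (msg : String) (vad : List (String × Int)) (out : Option String × Option Int) : Prop := out = get_partial_varname_addr_alt msg vad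
instance (msg : String) (vad : List (String × Int)) (out : Option String × Option Int) : Decidable (Spec_get_partial_varname_addr msg vad out) := by unfold Spec_get_partial_varname_addr; infer_instance

-- ===== CLAIM (what is proved, stated in full; the proofs are below) =====
def Claim_equal_get_partial_varname_addr : Prop := ∀ (msg : String) (vad : List (String × Int)), Dom_get_partial_varname_addr msg vad → Spec_get_partial_varname_addr msg vad (get_partial_varname_addr msg vad)

-- ===== LEMMAS AND PROOFS =====

-- the two shapes of B's loop body
theorem pvStepB_none_eq (msg : String) (kv : String × Int) :
    pvStepB msg none kv = if PySem.Str.startswith msg kv.1 then some kv else none := by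
  simp [pvStepB]

theorem pvStepB_some_eq (msg : String) (b kv : String × Int) :
    pvStepB msg (some b) kv
      = if PySem.Str.startswith msg kv.1 && decide (PySem.Str.len b.1 < PySem.Str.len kv.1)
        then some kv else some b := rfl

-- A's loop over range(len(msg)+1): it ends at the greatest x with p x, if any.
theorem pvFoldA_char {α : Type} (p : Nat → Bool) (q : Nat → α) (m : Nat) (acc : Option α) :
    (List.range (m+1)).foldl (fun lm x => if p x then some (q x) else lm) acc
    = if (∃ x, x ≤ m ∧ p x = true) then some (q (Nat.findGreatest (fun x => p x = true) m)) else acc := by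
  induction m generalizing acc with
  | zero =>
    simp only [List.range_succ, List.range_zero, List.nil_append, List.foldl_cons, List.foldl_nil]
    by_cases h : p 0 = true
    · simp [h]
    · simp only [Bool.not_eq_true] at h
      simp [h]
  | succ m ih =>
    rw [List.range_succ, List.foldl_append, ih]
    simp only [List.foldl_cons, List.foldl_nil]
    by_cases h : p (m+1) = true
    · have hex : ∃ x, x ≤ m + 1 ∧ p x = true := ⟨m+1, le_refl _, h⟩
      simp only [hex, if_true]
      simp [h]
    · simp only [Bool.not_eq_true] at h
      have hiff : (∃ x, x ≤ m + 1 ∧ p x = true) ↔ (∃ x, x ≤ m ∧ p x = true) := by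
        constructor
        · rintro ⟨x, hx, hp⟩
          rcases Nat.lt_or_ge x (m+1) with hlt | hge
          · exact ⟨x, by omega, hp⟩
          · have hxe : x = m + 1 := by omega
            rw [hxe, h] at hp
            exact absurd hp (by simp)
        · rintro ⟨x, hx, hp⟩; exact ⟨x, by omega, hp⟩
      have hfg : Nat.findGreatest (fun x => p x = true) (m+1) = Nat.findGreatest (fun x => p x = true) m := by
        rw [Nat.findGreatest_succ]; simp [h]
      rw [h]
      simp only [Bool.false_eq_true, if_false, hiff, hfg]

-- B's fold is none iff no key is a prefix of msg
theorem pvFoldB_none (msg : String) (l : List (String × Int)) :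
    l.foldl (pvStepB msg) none = none ↔ ∀ kv ∈ l, PySem.Str.startswith msg kv.1 = false := by
  induction l using List.reverseRecOn with
  | nil => simp
  | append_singleton l kv ih =>
    rw [List.foldl_append, List.foldl_cons, List.foldl_nil]
    rcases hb : l.foldl (pvStepB msg) none with _ | b
    · rw [ih] at hb
      rw [pvStepB_none_eq]
      constructor
      · intro h kv' hkv'
        rcases List.mem_append.mp hkv' with hl | hr
        · exact hb kv' hl
        · have hkve : kv' = kv := by simpa using hr
          subst hkve
          cases hs : PySem.Str.startswith msg kv'.1
          · rfl
          · rw [hs] at h; simp at h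
      · intro h
        rw [h kv (by simp)]
        simp
    · rw [pvStepB_some_eq]
      constructor
      · intro h
        by_cases hc : (PySem.Str.startswith msg kv.1 && decide (PySem.Str.len b.1 < PySem.Str.len kv.1)) = true
        · rw [if_pos hc] at h; simp at h
        · rw [if_neg hc] at h; simp at h
      · intro h
        exfalso
        have hbn := ih.mpr (fun kv' hkv' => h kv' (by simp [hkv']))
        rw [hbn] at hb
        simp at hb

-- B's fold result: its key is a prefix of msg, of maximal length among prefix keys,
-- and the result is the first entry with that key.
theorem pvFoldB_some (msg : String) (l : List (String × Int)) (k : String) (v : Int)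
    (h : l.foldl (pvStepB msg) none = some (k, v)) :
    PySem.Str.startswith msg k = true ∧
    (∀ kv ∈ l, PySem.Str.startswith msg kv.1 = true → kv.1.length ≤ k.length) ∧
    l.find? (fun kv => kv.1 == k) = some (k, v) := by
  induction l using List.reverseRecOn generalizing k v with
  | nil => simp at h
  | append_singleton l kv ih =>
    rw [List.foldl_append, List.foldl_cons, List.foldl_nil] at h
    rcases hb : l.foldl (pvStepB msg) none with _ | ⟨k', v'⟩
    · -- earlier part found nothing: every key of l fails startswith
      have hall := (pvFoldB_none msg l).mp hb
      rw [hb, pvStepB_none_eq] at h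
      by_cases hc : PySem.Str.startswith msg kv.1 = true
      · rw [if_pos hc] at h
        simp only [Option.some.injEq] at h
        subst h
        have hck : PySem.Str.startswith msg k = true := hc
        refine ⟨hck, ?_, ?_⟩
        · intro kv' hkv' hs
          rcases List.mem_append.mp hkv' with hl | hr
          · rw [hall kv' hl] at hs; exact absurd hs (by simp)
          · have hkve : kv' = (k, v) := by simpa using hr
            subst hkve; exact le_refl _
        · rw [List.find?_append]
          have hnone : l.find? (fun kv => kv.1 == k) = none := by
            apply List.find?_eq_none.mpr
            intro kv' hkv' hbeq
            have hk : kv'.1 = k := by simpa using hbeq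
            have hsf := hall kv' hkv'
            rw [hk, hck] at hsf
            exact absurd hsf (by simp)
          rw [hnone]
          simp
      · rw [if_neg hc] at h
        simp at h
    · -- earlier part found (k', v')
      obtain ⟨hgood', hmax', hfind'⟩ := ih k' v' hb
      rw [hb, pvStepB_some_eq] at h
      by_cases hc : (PySem.Str.startswith msg kv.1 && decide (PySem.Str.len (k', v').1 < PySem.Str.len kv.1)) = true
      · -- new entry kv wins
        rw [if_pos hc] at h
        simp only [Option.some.injEq] at h
        subst h
        simp only [Bool.and_eq_true, decide_eq_true_eq] at hc
        obtain ⟨hs, hlt⟩ := hc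
        have hsk : PySem.Str.startswith msg k = true := hs
        have hlen : k'.length < k.length := by
          simp only [PySem.Str.len_eq, String.length_toList] at hlt
          exact_mod_cast hlt
        refine ⟨hsk, ?_, ?_⟩
        · intro kv' hkv' hs'
          rcases List.mem_append.mp hkv' with hl | hr
          · exact le_of_lt (lt_of_le_of_lt (hmax' kv' hl hs') hlen)
          · have hkve : kv' = (k, v) := by simpa using hr
            subst hkve; exact le_refl _
        · rw [List.find?_append]
          have hnone : l.find? (fun kv => kv.1 == k) = none := by
            apply List.find?_eq_none.mpr
            intro kv' hkv' hbeq
            have hk : kv'.1 = k := by simpa using hbeq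
            have hle := hmax' kv' hkv' (by rw [hk]; exact hsk)
            rw [hk] at hle
            omega
          rw [hnone]
          simp
      · -- old best kept
        rw [if_neg hc] at h
        simp only [Option.some.injEq, Prod.mk.injEq] at h
        obtain ⟨hk, hv⟩ := h
        subst hk; subst hv
        refine ⟨hgood', ?_, ?_⟩
        · intro kv' hkv' hs'
          rcases List.mem_append.mp hkv' with hl | hr
          · exact hmax' kv' hl hs'
          · have hkve : kv' = kv := by simpa using hr
            subst hkve
            by_contra hgt
            have hgt' : k'.length < kv'.1.length := Nat.lt_of_not_le hgt
            apply hc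
            simp only [Bool.and_eq_true, decide_eq_true_eq]
            refine ⟨hs', ?_⟩
            simp only [PySem.Str.len_eq, String.length_toList]
            exact_mod_cast hgt'
        · rw [List.find?_append, hfind']
          simp

-- the A-side prefix string msg[:x] : its char list is take x
theorem pvSliceTake (msg : String) (x : Nat) :
    (PySem.Str.slice msg none (some (x : Int))).toList = msg.toList.take x := by
  simp [PySem.List.slice_to_natCast]

-- a key that startswith msg equals the slice at its own length
theorem pvKeyEqSlice (msg k : String) (hpre : k.toList <+: msg.toList) :
    k = PySem.Str.slice msg none (some (k.length : Int)) :=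
  String.toList_inj.mp (by
    rw [pvSliceTake, ← String.length_toList]
    exact List.prefix_iff_eq_take.mp hpre)

-- ===== VERDICT (by name: the statement is the Claim_ definition above) =====
theorem get_partial_varname_addr_spec : Claim_equal_get_partial_varname_addr := by
  intro msg vad _
  unfold Spec_get_partial_varname_addr get_partial_varname_addr get_partial_varname_addr_alt
  by_cases h0 : PySem.Str.len msg = 0
  · rw [if_pos h0, if_pos h0]
  · rw [if_neg h0, if_neg h0, PySem.Str.len_eq]
    have hrange : PySem.List.pyRange 0 ((msg.toList.length : Int) + 1) 1
        = (List.range (msg.toList.length + 1)).map (fun x : Nat => (x : Int)) := by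
      rw [PySem.List.pyRange_one]; simp
    have hA : (PySem.List.pyRange 0 ((msg.toList.length : Int) + 1) 1).foldl
        (fun lm x =>
          let partial_name := PySem.Str.slice msg none (some x)
          if vad.any (fun kv => kv.1 == partial_name) then some partial_name else lm)
        (none : Option String)
        = if (∃ x, x ≤ msg.toList.length ∧ (vad.any fun kv => kv.1 == PySem.Str.slice msg none (some (x:Int))) = true)
          then some (PySem.Str.slice msg none
            (some ((Nat.findGreatest (fun x : Nat => (vad.any fun kv => kv.1 == PySem.Str.slice msg none (some (x:Int))) = true) msg.toList.length : Nat) : Int)))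
          else none := by
      rw [hrange, List.foldl_map]
      exact pvFoldA_char (fun x : Nat => vad.any fun kv => kv.1 == PySem.Str.slice msg none (some (x:Int)))
        (fun x : Nat => PySem.Str.slice msg none (some (x:Int))) msg.toList.length none
    rw [hA]
    by_cases hex : ∃ x, x ≤ msg.toList.length ∧ (vad.any fun kv => kv.1 == PySem.Str.slice msg none (some (x:Int))) = true
    · rw [if_pos hex]
      rcases hfold : vad.foldl (pvStepB msg) none with _ | ⟨k, v⟩
      · exfalso
        have hall := (pvFoldB_none msg vad).mp hfold
        obtain ⟨x, hx, hp⟩ := hex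
        obtain ⟨kv, hmem, hbeq⟩ := List.any_eq_true.mp hp
        have hk : kv.1 = PySem.Str.slice msg none (some (x:Int)) := by simpa using hbeq
        have hs : PySem.Str.startswith msg kv.1 = true := by
          have hpre : kv.1.toList <+: msg.toList := by
            rw [hk, pvSliceTake]; exact List.take_prefix x msg.toList
          simpa [PySem.Chars.startswith_iff] using hpre
        rw [hall kv hmem] at hs
        exact absurd hs (by simp)
      · obtain ⟨hgood, hmax, hfind⟩ := pvFoldB_some msg vad k v hfold
        have hpre : k.toList <+: msg.toList := by
          simpa [PySem.Chars.startswith_iff] using hgood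
        have hx0 : k.length ≤ msg.toList.length := by
          rw [← String.length_toList]; exact hpre.length_le
        have hkq := pvKeyEqSlice msg k hpre
        have hmemk : (k, v) ∈ vad := List.mem_of_find?_eq_some hfind
        have hpk : (vad.any fun kv => kv.1 == PySem.Str.slice msg none (some (k.length:Int))) = true := by
          rw [List.any_eq_true]
          exact ⟨(k, v), hmemk, by simp [← hkq]⟩
        have hge : k.length ≤ Nat.findGreatest (fun x : Nat => (vad.any fun kv => kv.1 == PySem.Str.slice msg none (some (x:Int))) = true) msg.toList.length :=
          Nat.le_findGreatest hx0 hpk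
        obtain ⟨x, hx, hp⟩ := hex
        have hsp := Nat.findGreatest_spec (P := fun x : Nat => (vad.any fun kv => kv.1 == PySem.Str.slice msg none (some (x:Int))) = true) hx hp
        have hle2 : Nat.findGreatest (fun x : Nat => (vad.any fun kv => kv.1 == PySem.Str.slice msg none (some (x:Int))) = true) msg.toList.length ≤ msg.toList.length :=
          Nat.findGreatest_le msg.toList.length
        have hle : Nat.findGreatest (fun x : Nat => (vad.any fun kv => kv.1 == PySem.Str.slice msg none (some (x:Int))) = true) msg.toList.length ≤ k.length := by
          obtain ⟨kv', hmem', hbeq'⟩ := List.any_eq_true.mp hsp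
          have hk' : kv'.1 = PySem.Str.slice msg none (some ((Nat.findGreatest (fun x : Nat => (vad.any fun kv => kv.1 == PySem.Str.slice msg none (some (x:Int))) = true) msg.toList.length : Nat):Int)) := by
            simpa using hbeq'
          have hs' : PySem.Str.startswith msg kv'.1 = true := by
            have hpre' : kv'.1.toList <+: msg.toList := by
              rw [hk', pvSliceTake]; exact List.take_prefix _ _
            simpa [PySem.Chars.startswith_iff] using hpre'
          have hmle := hmax kv' hmem' hs'
          have hlen' : kv'.1.toList.length = Nat.findGreatest (fun x : Nat => (vad.any fun kv => kv.1 == PySem.Str.slice msg none (some (x:Int))) = true) msg.toList.length := by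
            rw [hk', pvSliceTake]
            simp only [List.length_take]
            omega
          have b1 : kv'.1.toList.length = kv'.1.length := String.length_toList
          omega
        have heq : Nat.findGreatest (fun x : Nat => (vad.any fun kv => kv.1 == PySem.Str.slice msg none (some (x:Int))) = true) msg.toList.length = k.length :=
          le_antisymm hle hge
        rw [heq, ← hkq]
        show (some k, (vad.find? (fun kv => kv.1 == k)).map (fun x => x.2)) = _
        rw [hfind]
        rfl
    · rw [if_neg hex]
      have hall : ∀ kv ∈ vad, PySem.Str.startswith msg kv.1 = false := by
        intro kv hmem
        by_contra hs
        rw [Bool.not_eq_false] at hs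
        have hpre : kv.1.toList <+: msg.toList := by
          simpa [PySem.Chars.startswith_iff] using hs
        apply hex
        refine ⟨kv.1.length, ?_, ?_⟩
        · rw [← String.length_toList]; exact hpre.length_le
        · rw [List.any_eq_true]
          exact ⟨kv, hmem, by simp [← pvKeyEqSlice msg kv.1 hpre]⟩
      rw [(pvFoldB_none msg vad).mpr hall]
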